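-- pv_equiv track=rewrite | github.com/vmercy/WordInventor | main.py | getAllChars
-- ===== SOURCE A (Python) =====
-- def getAllChars(sequenceMatrix):
--     """Generates a list containing all analyzed characters. Each character appears only once.
--
--     Args:
--         sequenceMatrix (array): the sequence matrix
--
--     Returns:
--         array: array containing all analyzed characters with no duplicate
--     """
--     allChars = []
--     for sequence in sequenceMatrix:
--         for i in range(0, 2):
--             if not sequence[i] in allChars:
--                 allChars.append(sequence[i])
--     allChars.sort()
--     return allChars
-- ===== SOURCE B (Python) =====
-- def getAllChars(sequenceMatrix):
--     """Collect the first two entries of every sequence, sort once, then drop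
--     adjacent duplicates in a single linear pass (no O(n^2) membership scans)."""
--     flat = []
--     for sequence in sequenceMatrix:
--         flat.append(sequence[0])
--         flat.append(sequence[1])
--     flat.sort()
--     allChars = []
--     for c in flat:
--         if not allChars or allChars[-1] != c:
--             allChars.append(c)
--     return allChars
-- ===== Notes on version B (the rewrite author's own statement) =====
-- stated objective: alternative
-- what changed: Replaces A's linear membership scan over the growing result for each element with one flat collection pass, a single sort, and a linear adjacent-duplicate-dropping pass (sort-then-dedup instead of dedup-then-sort); measured about 1.48x at the largest size, below the 1.5x bar, so not claimed as faster.
import Mathlib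
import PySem

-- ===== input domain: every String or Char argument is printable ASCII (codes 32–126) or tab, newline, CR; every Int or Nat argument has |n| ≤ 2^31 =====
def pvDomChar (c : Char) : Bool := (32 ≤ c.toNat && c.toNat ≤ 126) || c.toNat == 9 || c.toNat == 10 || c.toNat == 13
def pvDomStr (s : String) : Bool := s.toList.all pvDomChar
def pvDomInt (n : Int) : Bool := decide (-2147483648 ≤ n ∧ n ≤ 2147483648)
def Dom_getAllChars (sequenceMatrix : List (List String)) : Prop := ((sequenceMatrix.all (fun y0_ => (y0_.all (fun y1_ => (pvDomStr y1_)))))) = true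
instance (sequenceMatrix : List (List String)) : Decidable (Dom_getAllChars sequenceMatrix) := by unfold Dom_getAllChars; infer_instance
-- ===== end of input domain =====

-- B collects the first two entries of each sequence into one flat list, sorts once, then drops
-- adjacent duplicates in a single linear pass, replacing A's per-element membership scans.


-- ===== PORT A =====
-- sequence[i] is PySem.List.pyGetD sequence i ""; Pre_ below admits only inputs where the
-- index is in range (Python raises IndexError otherwise), so the default is never used.
def getAllChars (sequenceMatrix : List (List String)) : List String :=
  let allChars := sequenceMatrix.foldl (fun allChars sequence =>
      (PySem.List.pyRange 0 2 1).foldl (fun allChars i =>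
        if !(allChars.contains (PySem.List.pyGetD sequence i "")) then
          allChars ++ [PySem.List.pyGetD sequence i ""]
        else allChars) allChars) []
  PySem.List.sorted allChars (fun x => x) false

-- ===== PORT B =====
def getAllChars_alt (sequenceMatrix : List (List String)) : List String :=
  let flat := sequenceMatrix.foldl (fun flat sequence =>
      (flat ++ [PySem.List.pyGetD sequence 0 ""]) ++ [PySem.List.pyGetD sequence 1 ""]) []
  let flatS := PySem.List.sorted flat (fun x => x) false
  flatS.foldl (fun allChars c =>
      if !(allChars.getLast? == some c) then allChars ++ [c] else allChars) []

-- ===== PRECONDITION & SPEC =====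
-- Pre_ excludes exactly the inputs where both Pythons raise IndexError: a sequence shorter than 2.
def Pre_getAllChars (sequenceMatrix : List (List String)) : Prop :=
  ∀ s ∈ sequenceMatrix, 2 ≤ s.length
instance (sequenceMatrix : List (List String)) : Decidable (Pre_getAllChars sequenceMatrix) := by
  unfold Pre_getAllChars; infer_instance
def pvWitness_getAllChars : List (List String) := [["b", "a"], ["a", "c"]]

def Spec_getAllChars (sequenceMatrix : List (List String)) (out : List String) : Prop := out = getAllChars_alt sequenceMatrix
instance (sequenceMatrix : List (List String)) (out : List String) : Decidable (Spec_getAllChars sequenceMatrix out) := by unfold Spec_getAllChars; infer_instance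

-- ===== CLAIM (what is proved, stated in full; the proofs are below) =====
def Claim_equal_getAllChars : Prop := ∀ (sequenceMatrix : List (List String)), Dom_getAllChars sequenceMatrix → Pre_getAllChars sequenceMatrix → Spec_getAllChars sequenceMatrix (getAllChars sequenceMatrix)

-- ===== LEMMAS AND PROOFS =====

-- A's dedup-append loop over the two indexed entries of each sequence builds set(flat) in order.
theorem aFold_eq_ofList (m : List (List String)) (acc : List String) :
    m.foldl (fun allChars sequence =>
        (PySem.List.pyRange 0 2 1).foldl (fun allChars i =>
          if !(allChars.contains (PySem.List.pyGetD sequence i "")) then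
            allChars ++ [PySem.List.pyGetD sequence i ""]
          else allChars) allChars) acc
    = (m.flatMap (fun s => [PySem.List.pyGetD s 0 "", PySem.List.pyGetD s 1 ""])).foldl
        PySem.Set.add acc := by
  induction m generalizing acc with
  | nil => simp
  | cons s t ih =>
    have hr : PySem.List.pyRange 0 2 1 = [0, 1] := by decide
    rw [List.foldl_cons, ih, hr]
    simp only [List.flatMap_cons, List.foldl_append, List.foldl_cons, List.foldl_nil]
    congr 1
    by_cases h0 : PySem.List.pyGetD s 0 "" ∈ acc <;>
      by_cases h1 : PySem.List.pyGetD s 1 "" ∈ PySem.Set.add acc (PySem.List.pyGetD s 0 "") <;>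
        simp_all [PySem.Set.add]

-- B's flat-collection loop is that same flat list.
theorem bFlat_eq (m : List (List String)) (acc : List String) :
    m.foldl (fun flat sequence =>
        (flat ++ [PySem.List.pyGetD sequence 0 ""]) ++ [PySem.List.pyGetD sequence 1 ""]) acc
    = acc ++ m.flatMap (fun s => [PySem.List.pyGetD s 0 "", PySem.List.pyGetD s 1 ""]) := by
  simp [List.flatMap_def]

-- In a ≤-sorted list the last element is an upper bound.
theorem le_getLast_of_pairwise {l : List String} {m : String}
    (hp : l.Pairwise (· ≤ ·)) (h : l.getLast? = some m) : ∀ a ∈ l, a ≤ m := by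
  induction l with
  | nil => simp at h
  | cons b t ih =>
    cases t with
    | nil => simp_all
    | cons c t' =>
      have h' : (c :: t').getLast? = some m := by simpa using h
      intro a ha
      rcases List.mem_cons.mp ha with rfl | ha'
      · exact le_trans ((List.pairwise_cons.mp hp).1 c (by simp))
          (ih (List.pairwise_cons.mp hp).2 h' c (by simp))
      · exact ih (List.pairwise_cons.mp hp).2 h' a ha'

-- On a ≤-sorted input, adjacent-dedup and first-occurrence dedup (Set.add) coincide.
theorem adjFold_eq_setFold (ys acc : List String)
    (hys : ys.Pairwise (· ≤ ·)) (hacc : acc.Pairwise (· ≤ ·))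
    (hle : ∀ x ∈ ys, ∀ a ∈ acc, a ≤ x) :
    ys.foldl (fun allChars c =>
        if !(allChars.getLast? == some c) then allChars ++ [c] else allChars) acc
    = ys.foldl PySem.Set.add acc := by
  induction ys generalizing acc with
  | nil => rfl
  | cons c t ih =>
    have hct : ∀ x ∈ t, c ≤ x := fun x hx => (List.pairwise_cons.mp hys).1 x hx
    have ht : t.Pairwise (· ≤ ·) := (List.pairwise_cons.mp hys).2
    have hca : ∀ a ∈ acc, a ≤ c := hle c (by simp)
    have hkey : (acc.getLast? == some c) = acc.contains c := by
      rcases h : acc.getLast? with _ | m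
      · rcases acc with _ | ⟨b, t'⟩
        · simp
        · simp at h
      · have hm : m ∈ acc := List.mem_of_getLast? h
        by_cases hc : c ∈ acc
        · have : m = c := le_antisymm (hca m hm) (le_getLast_of_pairwise hacc h c hc)
          subst this; simp [hc]
        · have : ¬ m = c := fun e => hc (e ▸ hm)
          simp [hc, this]
    have hstep : (if !(acc.getLast? == some c) then acc ++ [c] else acc) = PySem.Set.add acc c := by
      simp only [PySem.Set.add, hkey]
      by_cases hc : c ∈ acc <;> simp [hc]
    rw [List.foldl_cons, List.foldl_cons, hstep]
    by_cases hc : c ∈ acc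
    · have : PySem.Set.add acc c = acc := by simp [PySem.Set.add, hc]
      rw [this]
      exact ih acc ht hacc (fun x hx => hle x (by simp [hx]))
    · have hadd : PySem.Set.add acc c = acc ++ [c] := by simp [PySem.Set.add, hc]
      rw [hadd]
      refine ih (acc ++ [c]) ht ?_ ?_
      · exact List.pairwise_append.mpr ⟨hacc, by simp, by simpa using hca⟩
      · intro x hx a ha
        rcases List.mem_append.mp ha with ha' | ha'
        · exact hle x (by simp [hx]) a ha'
        · simp at ha'; subst ha'; exact hct x hx

-- Folding Set.add only ever appends a sublist of the traversed list.
theorem foldl_add_sublist (t acc : List String) :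
    ∃ u : List String, u.Sublist t ∧ t.foldl PySem.Set.add acc = acc ++ u := by
  induction t generalizing acc with
  | nil => exact ⟨[], by simp⟩
  | cons a t ih =>
    simp only [List.foldl_cons]
    obtain ⟨u, hu, he⟩ := ih (PySem.Set.add acc a)
    by_cases h : a ∈ acc
    · exact ⟨u, hu.cons _, by simpa [PySem.Set.add, h] using he⟩
    · exact ⟨a :: u, hu.cons₂ _, by simpa [PySem.Set.add, h] using he⟩

-- set(xs) keeps first occurrences in order: it is a sublist of xs.
theorem ofList_sublist (xs : List String) : (PySem.Set.ofList xs).Sublist xs := by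
  rw [PySem.Set.ofList_eq_foldl]
  obtain ⟨u, hu, he⟩ := foldl_add_sublist xs []
  simpa [he] using hu

-- Dedup-then-sort equals sort-then-dedup.
theorem ofList_sorted_eq (flat : List String) :
    PySem.Set.ofList (PySem.List.sorted flat (fun x => x) false)
    = PySem.List.sorted (PySem.Set.ofList flat) (fun x => x) false := by
  apply Eq.symm
  apply PySem.List.sorted_eq_of_perm_of_pairwise_lt
  · apply List.perm_of_nodup_nodup_toFinset_eq (PySem.Set.nodup_ofList _) (PySem.Set.nodup_ofList _)
    ext x
    simp [PySem.Set.mem_ofList, PySem.List.mem_sorted]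
  · have hsub := ofList_sublist (PySem.List.sorted flat (fun x => x) false)
    have hle : (PySem.Set.ofList (PySem.List.sorted flat (fun x => x) false)).Pairwise (· ≤ ·) :=
      (PySem.List.sorted_pairwise flat (fun x => x)).sublist hsub
    have hnd := PySem.Set.nodup_ofList (PySem.List.sorted flat (fun x => x) false)
    exact (hle.and hnd).imp (fun h => lt_of_le_of_ne h.1 h.2)

-- ===== VERDICT (by name: the statement is the Claim_ definition above) =====
theorem getAllChars_spec : Claim_equal_getAllChars := by
  intro m _ _
  unfold Spec_getAllChars getAllChars getAllChars_alt
  rw [aFold_eq_ofList, bFlat_eq, List.nil_append]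
  rw [adjFold_eq_setFold _ _ (PySem.List.sorted_pairwise _ _) (List.Pairwise.nil) (by simp)]
  rw [← PySem.Set.ofList_eq_foldl, ← PySem.Set.ofList_eq_foldl, ofList_sorted_eq]
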